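-- pv_equiv track=rewrite | github.com/bssrdf/pyleet | R/RearrangingFruits.py | minCost3
-- ===== SOURCE A (Python) =====
-- from typing import List
-- from collections import Counter
--
-- def minCost3(basket1: List[int], basket2: List[int]) -> int:
--     cnt = Counter(basket1)
--     for x in basket2: cnt[x] -= 1
--     last = []
--     for k, v in cnt.items():
--         # if v is odd, an even distribution is never possible
--         if v % 2 != 0:
--             return -1
--         # the count of transferred k is |v|/2
--         last += [k] * abs(v // 2)
--     # find the min of two input arrays as the intermediate
--     minx = min(basket1 + basket2)
--     # Use quickselect instead of sort can get a better complexity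
--     last.sort()
--     # The first half may be the cost
--     return sum(min(2*minx, x) for x in last[0:len(last)//2])
-- ===== SOURCE B (Python) =====
-- from typing import List
-- from collections import Counter
--
-- def select_sum(xs, k):
--     # quickselect-style partial selection: sum of the k smallest values of xs,
--     # by recursive three-way partitioning around a pivot -- no sort.
--     if k == 0:
--         return 0
--     if k >= len(xs):
--         return sum(xs)
--     pivot = xs[len(xs) // 2]
--     lo = [x for x in xs if x < pivot]
--     eq = [x for x in xs if x == pivot]
--     hi = [x for x in xs if x > pivot]
--     if k <= len(lo):
--         return select_sum(lo, k)
--     if k <= len(lo) + len(eq):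
--         return sum(lo) + (k - len(lo)) * pivot
--     return sum(lo) + sum(eq) + select_sum(hi, k - len(lo) - len(eq))
--
-- def minCost3(basket1: List[int], basket2: List[int]) -> int:
--     diff = Counter(basket1)
--     diff.subtract(basket2)
--     if any(v % 2 for v in diff.values()):
--         return -1
--     cap = 2 * min(basket1 + basket2)
--     # clamp each transferred fruit's cost up front, then select the cheapest
--     # half without ever sorting
--     costs = [min(cap, k) for k, v in diff.items() for _ in range(abs(v) // 2)]
--     return select_sum(costs, len(costs) // 2)
-- ===== Notes on version B (the rewrite author's own statement) =====
-- stated objective: alternative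
-- what changed: B never sorts: it clamps each transferred fruit's cost to min(2*minx, k) up front and then computes the sum of the cheapest half by a recursive quickselect-style three-way partition (partial selection), instead of A's sort-then-slice-then-sum.
import Mathlib
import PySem

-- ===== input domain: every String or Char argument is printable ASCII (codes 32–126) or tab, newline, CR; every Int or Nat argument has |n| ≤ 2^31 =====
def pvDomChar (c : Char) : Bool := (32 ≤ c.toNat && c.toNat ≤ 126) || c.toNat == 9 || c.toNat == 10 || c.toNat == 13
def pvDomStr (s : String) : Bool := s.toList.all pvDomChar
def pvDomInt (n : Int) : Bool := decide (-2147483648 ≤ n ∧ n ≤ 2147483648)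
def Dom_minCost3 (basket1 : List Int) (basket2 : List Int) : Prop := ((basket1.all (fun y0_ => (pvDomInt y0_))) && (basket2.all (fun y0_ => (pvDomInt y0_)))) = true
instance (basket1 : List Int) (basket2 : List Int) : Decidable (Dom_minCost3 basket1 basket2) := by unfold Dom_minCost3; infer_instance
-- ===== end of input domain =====

-- B replaces A's sort-then-slice selection by a quickselect-style recursive
-- three-way partition summing the cheapest half directly ("alternative"; A raises on two empty baskets).

-- ===== PORT A =====
-- 'last += [k] * abs(v // 2)' block
def pvRepA (p : Int × Int) : List Int :=
  List.replicate (|PySem.Int.floordiv p.2 2|).toNat p.1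

-- the 'for k, v in cnt.items():' loop; none = the 'return -1' path
def pvLast : List (Int × Int) → List Int → Option (List Int)
  | [], acc => some acc
  | p :: rest, acc =>
    if PySem.Int.mod p.2 2 ≠ 0 then none
    else pvLast rest (acc ++ pvRepA p)

def minCost3 (basket1 : List Int) (basket2 : List Int) : Int :=
  let cnt := basket2.foldl (fun d x => d.modify x 0 (· - 1)) (PySem.Dict.counter basket1)
  match pvLast cnt.items [] with
  | none => -1
  | some last =>
    let minx := (PySem.List.min? (basket1 ++ basket2) (fun x => x)).getD 0
    let sortedLast := PySem.List.sorted last (fun x => x) false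
    (sortedLast.take (last.length / 2)).foldl (fun s x => s + min (2 * minx) x) 0

-- ===== PORT B =====
-- select_sum: sum of the k smallest values of xs by three-way partitioning.
-- fuel (= xs.length at the call site) only makes the recursion structural;
-- every recursive call is on a strictly shorter list, so it never runs out.
def pvSelectSum : Nat → List Int → Int → Int
  | 0, _, _ => 0
  | fuel + 1, xs, k =>
    if k = 0 then 0
    else if (xs.length : Int) ≤ k then xs.sum
    else
      -- xs[len(xs) // 2]: the index is in range here (0 < k < len xs)
      let pivot := (xs[xs.length / 2]?).getD 0
      let lo := xs.filter (fun x => decide (x < pivot))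
      let eq := xs.filter (fun x => x == pivot)
      let hi := xs.filter (fun x => decide (pivot < x))
      if k ≤ (lo.length : Int) then pvSelectSum fuel lo k
      else if k ≤ (lo.length : Int) + (eq.length : Int) then
        lo.sum + (k - lo.length) * pivot
      else lo.sum + eq.sum + pvSelectSum fuel hi (k - lo.length - eq.length)

def minCost3_alt (basket1 : List Int) (basket2 : List Int) : Int :=
  let diff := basket2.foldl (fun d x => d.modify x 0 (· - 1)) (PySem.Dict.counter basket1)
  if diff.values.any (fun v => PySem.Int.mod v 2 ≠ 0) then -1
  else
    let cap := 2 * (PySem.List.min? (basket1 ++ basket2) (fun x => x)).getD 0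
    let costs := diff.items.flatMap
      (fun p => List.replicate (PySem.Int.floordiv |p.2| 2).toNat (min cap p.1))
    pvSelectSum costs.length costs (PySem.Int.floordiv (costs.length : Int) 2)

-- ===== PRECONDITION & SPEC =====
-- Pre_ excludes only basket1 = [] ∧ basket2 = [], where Python A raises ValueError (min of an empty sequence).
def Pre_minCost3 (basket1 : List Int) (basket2 : List Int) : Prop := basket1 ≠ [] ∨ basket2 ≠ []
instance (basket1 : List Int) (basket2 : List Int) : Decidable (Pre_minCost3 basket1 basket2) := by unfold Pre_minCost3; infer_instance
def pvWitness_minCost3 : List Int × List Int := ([1, 2], [2, 1])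

def Spec_minCost3 (basket1 : List Int) (basket2 : List Int) (out : Int) : Prop := out = minCost3_alt basket1 basket2
instance (basket1 : List Int) (basket2 : List Int) (out : Int) : Decidable (Spec_minCost3 basket1 basket2 out) := by unfold Spec_minCost3; infer_instance

-- ===== CLAIM (what is proved, stated in full; the proofs are below) =====
def Claim_equal_minCost3 : Prop := ∀ (basket1 : List Int) (basket2 : List Int), Dom_minCost3 basket1 basket2 → Pre_minCost3 basket1 basket2 → Spec_minCost3 basket1 basket2 (minCost3 basket1 basket2)

-- ===== LEMMAS AND PROOFS =====

-- A's items loop in closed form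
theorem pvLast_eq (l : List (Int × Int)) : ∀ (acc : List Int),
    pvLast l acc =
      if l.any (fun p => decide (PySem.Int.mod p.2 2 ≠ 0)) then none
      else some (acc ++ l.flatMap pvRepA) := by
  induction l with
  | nil => intro acc; simp [pvLast]
  | cons p rest ih =>
    intro acc
    by_cases h : PySem.Int.mod p.2 2 ≠ 0
    · simp only [pvLast, if_pos h, List.any_cons, Bool.or_eq_true, decide_eq_true_eq]
      rw [if_pos (Or.inl h)]
    · simp only [pvLast, if_neg h, ih, List.any_cons, decide_eq_false h, Bool.false_or,
        List.flatMap_cons, List.append_assoc]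

-- even count: A's [k] * abs(v//2) mapped through min cap is B's replicate block
theorem repA_map (cap : Int) (p : Int × Int) (h : PySem.Int.mod p.2 2 = 0) :
    (pvRepA p).map (fun x => min cap x) =
      List.replicate (PySem.Int.floordiv |p.2| 2).toNat (min cap p.1) := by
  unfold pvRepA
  rw [PySem.Int.mod_eq_emod_of_pos (by norm_num : (0:Int) < 2)] at h
  rw [PySem.Int.floordiv_eq_ediv_of_pos (by norm_num : (0:Int) < 2),
    PySem.Int.floordiv_eq_ediv_of_pos (by norm_num : (0:Int) < 2), List.map_replicate]
  congr 2
  rw [Int.abs_eq_natAbs, Int.abs_eq_natAbs]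
  omega

-- main selection lemma: pvSelectSum xs k is the sum of the k smallest elements of xs
theorem selectSum_eq : ∀ (fuel : Nat) (xs : List Int) (k : Int),
    xs.length ≤ fuel → 0 ≤ k →
    pvSelectSum fuel xs k = ((PySem.List.sorted xs (fun x => x) false).take k.toNat).sum := by
  intro fuel
  induction fuel with
  | zero =>
    intro xs k hlen _
    cases xs with
    | nil => simp [pvSelectSum, PySem.List.sorted]
    | cons a l => simp at hlen
  | succ fuel ih =>
    intro xs k hlen hk
    rw [pvSelectSum]
    by_cases hk0 : k = 0
    · subst hk0; simp
    rw [if_neg hk0]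
    have hperm := PySem.List.sorted_perm xs (fun x => x) false
    by_cases hbig : (xs.length : Int) ≤ k
    · rw [if_pos hbig]
      have hl : (PySem.List.sorted xs (fun x => x) false).length ≤ k.toNat := by
        rw [hperm.length_eq]; omega
      rw [List.take_of_length_le hl]
      exact hperm.sum_eq.symm
    rw [if_neg hbig]
    simp only []
    have hpos : 0 < xs.length := by omega
    have hidx : xs.length / 2 < xs.length := Nat.div_lt_self hpos (by norm_num)
    set pivot := (xs[xs.length / 2]?).getD 0 with hpiv
    have hmem : pivot ∈ xs := by
      rw [hpiv, List.getElem?_eq_getElem hidx]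
      exact List.getElem_mem _
    set lo := xs.filter (fun x => decide (x < pivot)) with hlo
    set eq := xs.filter (fun x => x == pivot) with heq
    set hi := xs.filter (fun x => decide (pivot < x)) with hhi
    have heqrep : eq = List.replicate eq.length pivot := by
      apply List.eq_replicate_of_mem
      intro b hb
      have := List.of_mem_filter hb
      simpa [beq_iff_eq] using this
    have heqpos : 0 < eq.length := by
      have : pivot ∈ eq := List.mem_filter.mpr ⟨hmem, by simp⟩
      exact List.length_pos_of_mem this
    have hperm3 : (lo ++ eq ++ hi).Perm xs := by
      apply List.perm_iff_count.mpr
      intro a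
      simp only [List.count_append, hlo, heq, hhi]
      rcases lt_trichotomy a pivot with h | h | h
      · rw [List.count_filter (by simp [h]),
          List.count_eq_zero_of_not_mem (l := List.filter _ xs)
            (by simp only [List.mem_filter, beq_iff_eq]; exact fun hc => h.ne hc.2),
          List.count_eq_zero_of_not_mem (l := List.filter _ xs)
            (by simp only [List.mem_filter, decide_eq_true_eq]
                exact fun hc => absurd hc.2 (not_lt.mpr h.le))]
        omega
      · subst h
        rw [List.count_eq_zero_of_not_mem (l := List.filter _ xs)
            (by simp only [List.mem_filter, decide_eq_true_eq]
                exact fun hc => absurd hc.2 (lt_irrefl _)),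
          List.count_filter (by simp),
          List.count_eq_zero_of_not_mem (l := List.filter _ xs)
            (by simp only [List.mem_filter, decide_eq_true_eq]
                exact fun hc => absurd hc.2 (lt_irrefl _))]
        omega
      · rw [List.count_eq_zero_of_not_mem (l := List.filter _ xs)
            (by simp only [List.mem_filter, decide_eq_true_eq]
                exact fun hc => absurd hc.2 (not_lt.mpr h.le)),
          List.count_eq_zero_of_not_mem (l := List.filter _ xs)
            (by simp only [List.mem_filter, beq_iff_eq]; exact fun hc => (ne_of_gt h) hc.2),
          List.count_filter (by simp [h])]
        omega
    have hlenadd : lo.length + eq.length + hi.length = xs.length := by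
      have := hperm3.length_eq
      simp only [List.length_append] at this
      omega
    have hS : PySem.List.sorted xs (fun x => x) false =
        PySem.List.sorted lo (fun x => x) false ++ eq ++ PySem.List.sorted hi (fun x => x) false := by
      apply PySem.List.sorted_id_eq_of_perm_of_pairwise
      · exact (((PySem.List.sorted_perm lo _ false).append (List.Perm.refl eq)).append
          (PySem.List.sorted_perm hi _ false)).trans hperm3
      · have plo : (PySem.List.sorted lo (fun x => x) false).Pairwise (· ≤ ·) :=
          PySem.List.sorted_pairwise lo (fun x => x)
        have phi : (PySem.List.sorted hi (fun x => x) false).Pairwise (· ≤ ·) :=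
          PySem.List.sorted_pairwise hi (fun x => x)
        have peq : eq.Pairwise (fun a b => a ≤ b) := by
          rw [heqrep]; exact List.pairwise_replicate.mpr (Or.inr le_rfl)
        have hlo_lt : ∀ a ∈ PySem.List.sorted lo (fun x => x) false, a < pivot := by
          intro a ha
          rw [PySem.List.mem_sorted] at ha
          have := List.of_mem_filter ha
          simpa using this
        have heq_eq : ∀ a ∈ eq, a = pivot := by
          intro a ha
          have := List.of_mem_filter ha
          simpa [beq_iff_eq] using this
        have hhi_gt : ∀ a ∈ PySem.List.sorted hi (fun x => x) false, pivot < a := by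
          intro a ha
          rw [PySem.List.mem_sorted] at ha
          have := List.of_mem_filter ha
          simpa using this
        rw [List.pairwise_append, List.pairwise_append]
        refine ⟨⟨plo, peq, ?_⟩, phi, ?_⟩
        · intro a ha b hb
          rw [heq_eq b hb]; exact le_of_lt (hlo_lt a ha)
        · intro a ha b hb
          rcases List.mem_append.mp ha with ha | ha
          · exact le_of_lt (lt_trans (hlo_lt a ha) (hhi_gt b hb))
          · rw [heq_eq a ha]; exact le_of_lt (hhi_gt b hb)
    rw [hS]
    have hlolen : (PySem.List.sorted lo (fun x => x) false).length = lo.length :=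
      (PySem.List.sorted_perm lo _ false).length_eq
    have hlosum : (PySem.List.sorted lo (fun x => x) false).sum = lo.sum :=
      (PySem.List.sorted_perm lo _ false).sum_eq
    by_cases h1 : k ≤ (lo.length : Int)
    · rw [if_pos h1, ih lo k (by omega) hk, List.append_assoc, List.take_append, hlolen]
      have h0 : k.toNat - lo.length = 0 := by omega
      rw [h0, List.take_zero, List.append_nil]
    rw [if_neg h1]
    have htake1 : (PySem.List.sorted lo (fun x => x) false ++ eq ++
        PySem.List.sorted hi (fun x => x) false).take k.toNat =
        PySem.List.sorted lo (fun x => x) false ++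
          ((eq ++ PySem.List.sorted hi (fun x => x) false).take (k.toNat - lo.length)) := by
      rw [List.append_assoc, List.take_append, hlolen, List.take_of_length_le (by omega)]
    by_cases h2 : k ≤ (lo.length : Int) + (eq.length : Int)
    · rw [if_pos h2, htake1, List.sum_append, hlosum, List.take_append]
      have hd0 : k.toNat - lo.length - eq.length = 0 := by omega
      rw [hd0, List.take_zero, List.append_nil]
      have htk : eq.take (k.toNat - lo.length) = List.replicate (k.toNat - lo.length) pivot := by
        conv_lhs => rw [heqrep]
        rw [List.take_replicate, Nat.min_eq_left (by omega)]
      rw [htk, List.sum_replicate, nsmul_eq_mul]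
      have hcast : ((k.toNat - lo.length : Nat) : Int) = k - lo.length := by omega
      rw [hcast]
    · rw [if_neg h2, htake1, List.take_append,
        List.take_of_length_le (le_of_eq_of_le rfl (by omega)),
        ih hi (k - lo.length - eq.length) (by omega) (by omega)]
      have hkh : (k - (lo.length : Int) - (eq.length : Int)).toNat
          = k.toNat - lo.length - eq.length := by omega
      rw [hkh, List.sum_append, List.sum_append, hlosum]
      ring

-- ===== VERDICT (by name: the statement is the Claim_ definition above) =====
theorem minCost3_spec : Claim_equal_minCost3 := by
  intro basket1 basket2 _ _
  unfold Spec_minCost3 minCost3 minCost3_alt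
  simp only []
  set cnt := basket2.foldl (fun d x => d.modify x 0 (· - 1)) (PySem.Dict.counter basket1) with hcnt
  rw [pvLast_eq]
  by_cases hodd : cnt.items.any (fun p => decide (PySem.Int.mod p.2 2 ≠ 0))
  · have hv : cnt.values.any (fun v => decide (PySem.Int.mod v 2 ≠ 0)) = true := by
      simpa [PySem.Dict.values, List.any_map, Function.comp_def] using hodd
    rw [if_pos hodd, if_pos hv]
  · have heven : ∀ p ∈ cnt.items, PySem.Int.mod p.2 2 = 0 := by
      intro p hp
      by_contra hne
      exact hodd (List.any_eq_true.mpr ⟨p, hp, by simpa using hne⟩)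
    have hv : cnt.values.any (fun v => decide (PySem.Int.mod v 2 ≠ 0)) = false := by
      simp only [PySem.Dict.values, List.any_map, Function.comp_def]
      simpa using hodd
    rw [if_neg hodd, if_neg (by rw [hv]; simp)]
    simp only [List.nil_append]
    set minx := (PySem.List.min? (basket1 ++ basket2) (fun x => x)).getD 0 with hminx
    set f : Int → Int := fun x => min (2 * minx) x with hf
    set last := cnt.items.flatMap pvRepA with hlast
    -- B's costs list is A's last list mapped through the clamp f
    have hcosts : cnt.items.flatMap
        (fun p => List.replicate (PySem.Int.floordiv |p.2| 2).toNat (min (2 * minx) p.1)) =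
        last.map f := by
      rw [hlast, List.map_flatMap]
      rw [List.flatMap_def, List.flatMap_def]
      congr 1
      apply List.map_congr_left
      intro p hp
      exact (repA_map (2 * minx) p (heven p hp)).symm
    rw [hcosts]
    -- the sorted clamped list is the clamped sorted list
    have hmono : ∀ a b : Int, a ≤ b → f a ≤ f b := fun a b h => min_le_min le_rfl h
    have hsortmap : PySem.List.sorted (last.map f) (fun x => x) false =
        (PySem.List.sorted last (fun x => x) false).map f := by
      apply PySem.List.sorted_id_eq_of_perm_of_pairwise
      · exact (PySem.List.sorted_perm last (fun x => x) false).map f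
      · exact List.Pairwise.map f hmono (PySem.List.sorted_pairwise last (fun x => x))
    -- evaluate both selections
    have hfd : PySem.Int.floordiv (((last.map f).length : Nat) : Int) 2
        = (((last.map f).length / 2 : Nat) : Int) := by
      exact_mod_cast PySem.Int.floordiv_natCast (last.map f).length 2
    rw [selectSum_eq _ _ _ (le_of_eq rfl) (by rw [hfd]; exact Int.natCast_nonneg _)]
    rw [hsortmap, hfd, Int.toNat_natCast, List.length_map, ← List.map_take,
      PySem.List.foldl_add]
    simp only [zero_add]
    rfl
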